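-- pv_equiv track=rewrite | github.com/Axym-Labs/pptrain | src/pptrain/tasks/simpler_tasks/tasks.py | index_of_subsequence
-- ===== SOURCE A (Python) =====
-- from typing import Sequence
--
-- def index_of_subsequence(sequence: Sequence[str], query: Sequence[str]) -> int:
--     if not query:
--         return 0
--     query_length = len(query)
--     for start in range(len(sequence) - query_length + 1):
--         if list(sequence[start : start + query_length]) == list(query):
--             return start
--     return -1
-- ===== SOURCE B (Python) =====
-- def _key(s):
--     return sum(map(ord, s))
--
--
-- def index_of_subsequence(sequence, query):
--     m = len(query)
--     if m == 0:
--         return 0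
--     n = len(sequence)
--     if m > n:
--         return -1
--     keys = [_key(s) for s in sequence]
--     target = sum(_key(s) for s in query)
--     window = sum(keys[:m])
--     i = 0
--     while True:
--         if window == target and list(sequence[i:i + m]) == list(query):
--             return i
--         if i == n - m:
--             return -1
--         window += keys[i + m] - keys[i]
--         i += 1
-- ===== Notes on version B (the rewrite author's own statement) =====
-- stated objective: alternative
-- what changed: Replaced A's slice-and-compare at every start with a Rabin-Karp-style scan: per-element integer keys computed once and a rolling window sum filter the candidate starts, the full slice comparison running only on filter hits.
import Mathlib
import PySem

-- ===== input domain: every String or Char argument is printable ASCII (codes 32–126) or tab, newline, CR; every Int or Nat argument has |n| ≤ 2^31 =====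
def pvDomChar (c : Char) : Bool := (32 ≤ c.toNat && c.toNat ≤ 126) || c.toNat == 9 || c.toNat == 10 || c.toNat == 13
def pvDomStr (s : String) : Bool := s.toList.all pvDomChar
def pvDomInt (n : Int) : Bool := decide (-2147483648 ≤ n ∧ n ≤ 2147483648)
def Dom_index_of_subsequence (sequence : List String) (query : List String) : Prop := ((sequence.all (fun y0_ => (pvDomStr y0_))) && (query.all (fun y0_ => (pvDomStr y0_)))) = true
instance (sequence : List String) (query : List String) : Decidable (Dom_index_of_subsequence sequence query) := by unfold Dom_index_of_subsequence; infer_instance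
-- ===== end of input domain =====

-- B replaces A's per-start slice comparison by a Rabin-Karp-style filtered scan (precomputed
-- element keys, rolling window sum, slice verification on filter hits); same return value.


-- ===== PORT A =====
-- the for-loop over range(len(sequence) - query_length + 1) with early return
def pvARec (seq q : List String) : List Int → Int
  | [] => -1
  | s :: rest =>
    if PySem.List.slice seq (some s) (some (s + (q.length : Int))) = q then s
    else pvARec seq q rest

def index_of_subsequence (sequence : List String) (query : List String) : Int :=
  if query = [] then 0
  else pvARec sequence query
    (PySem.List.pyRange 0 ((sequence.length : Int) - (query.length : Int) + 1) 1)

-- ===== PORT B =====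
-- _key(s) = sum(map(ord, s))  (exact: ord c = c.toNat)
def pvKey (s : String) : Int := (s.toList.map (fun c => (c.toNat : Int))).sum

-- the 'while True' loop of Source B; rem = (n - m) - i counts the remaining iterations
def pvBLoop (seq q : List String) (keys : List Int) (target : Int) :
    Nat → Int → Nat → Int
  | rem, window, i =>
    if window = target ∧
        PySem.List.slice seq (some (i : Int)) (some ((i : Int) + (q.length : Int))) = q then
      (i : Int)
    else
      match rem with
      | 0 => -1
      | r + 1 =>
          pvBLoop seq q keys target r
            (window + PySem.List.pyGetD keys ((i : Int) + (q.length : Int)) 0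
              - PySem.List.pyGetD keys (i : Int) 0) (i + 1)

def index_of_subsequence_alt (sequence : List String) (query : List String) : Int :=
  if query.length = 0 then 0
  else if query.length > sequence.length then -1
  else
    pvBLoop sequence query (sequence.map pvKey) ((query.map pvKey).sum)
      (sequence.length - query.length)
      ((PySem.List.slice (sequence.map pvKey) none (some (query.length : Int))).sum) 0

-- ===== PRECONDITION & SPEC =====
def Spec_index_of_subsequence (sequence : List String) (query : List String) (out : Int) : Prop := out = index_of_subsequence_alt sequence query
instance (sequence : List String) (query : List String) (out : Int) : Decidable (Spec_index_of_subsequence sequence query out) := by unfold Spec_index_of_subsequence; infer_instance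

-- ===== CLAIM (what is proved, stated in full; the proofs are below) =====
def Claim_equal_index_of_subsequence : Prop := ∀ (sequence : List String) (query : List String), Dom_index_of_subsequence sequence query → Spec_index_of_subsequence sequence query (index_of_subsequence sequence query)

-- ===== LEMMAS AND PROOFS =====

-- rolling-sum step: dropping ks[i] and adding ks[i+m] slides the window sum by one
theorem pv_roll (ks : List Int) (i m : Nat) (h1 : i + m < ks.length) (hm : 1 ≤ m) :
    ((ks.drop i).take m).sum + ks.getD (i + m) 0 - ks.getD i 0
      = ((ks.drop (i + 1)).take m).sum := by
  obtain ⟨m', rfl⟩ : ∃ m', m = m' + 1 := ⟨m - 1, by omega⟩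
  have hi : i < ks.length := by omega
  have hdi : ks.drop i = ks[i] :: ks.drop (i + 1) := List.drop_eq_getElem_cons hi
  have him : i + (m' + 1) < ks.length := h1
  have hgd1 : ks.getD (i + (m' + 1)) 0 = ks[i + (m' + 1)] := List.getD_eq_getElem ks 0 him
  have hgd2 : ks.getD i 0 = ks[i] := List.getD_eq_getElem ks 0 hi
  rw [hdi, hgd1, hgd2, List.take_succ_cons, List.sum_cons, List.take_add_one]
  have : (ks.drop (i + 1))[m']? = some ks[i + (m' + 1)] := by
    rw [List.getElem?_drop]
    have : i + 1 + m' = i + (m' + 1) := by omega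
    rw [this]
    exact List.getElem?_eq_getElem him
  rw [this]
  simp
  ring

-- a matching slice forces the window sum to equal the target sum
theorem pv_window_of_slice (seq q : List String) (i : Nat)
    (hs : PySem.List.slice seq (some (i : Int)) (some ((i : Int) + (q.length : Int))) = q) :
    ((((seq.map pvKey).drop i).take q.length)).sum = (q.map pvKey).sum := by
  rw [PySem.List.slice_natCast_add] at hs
  rw [← List.map_drop, ← List.map_take, hs]

-- loop equivalence: B's rolling-filter loop returns what A's range scan returns
theorem pv_main (seq q : List String) (hq : q ≠ []) :
    ∀ (rem i : Nat), i + q.length + rem = seq.length →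
      pvBLoop seq q (seq.map pvKey) ((q.map pvKey).sum) rem
          ((((seq.map pvKey).drop i).take q.length).sum) i
        = pvARec seq q
            (PySem.List.pyRange (i : Int) ((seq.length : Int) - (q.length : Int) + 1) 1) := by
  have hm : 1 ≤ q.length := List.length_pos_of_ne_nil hq
  intro rem
  induction rem with
  | zero =>
    intro i h
    have hb : ((seq.length : Int) - (q.length : Int) + 1) = (i : Int) + 1 := by omega
    rw [hb, PySem.List.pyRange_one_singleton, pvBLoop, pvARec]
    by_cases hs : PySem.List.slice seq (some (i : Int)) (some ((i : Int) + (q.length : Int))) = q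
    · simp [hs, pv_window_of_slice seq q i hs]
    · simp [hs, pvARec]
  | succ r ih =>
    intro i h
    have hlt : (i : Int) < (seq.length : Int) - (q.length : Int) + 1 := by omega
    rw [PySem.List.pyRange_one_cons hlt, pvBLoop, pvARec]
    by_cases hs : PySem.List.slice seq (some (i : Int)) (some ((i : Int) + (q.length : Int))) = q
    · simp [hs, pv_window_of_slice seq q i hs]
    · have hcast : (i : Int) + (q.length : Int) = ((i + q.length : Nat) : Int) := by push_cast; ring
      have him : i + q.length < (seq.map pvKey).length := by simp; omega
      have hroll := pv_roll (seq.map pvKey) i q.length (by simpa using him) hm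
      have ih' := ih (i + 1) (by omega)
      simp only [hcast, PySem.List.pyGetD_natCast]
      rw [List.getD_eq_getElem _ _ him, List.getD_eq_getElem _ _ (by simp; omega)] at hroll ⊢
      rw [hroll, ih']
      simp [hs]

-- ===== VERDICT (by name: the statement is the Claim_ definition above) =====
theorem index_of_subsequence_spec : Claim_equal_index_of_subsequence := by
  intro seq q _
  unfold Spec_index_of_subsequence index_of_subsequence index_of_subsequence_alt
  by_cases hq : q = []
  · simp [hq]
  · have hm : 1 ≤ q.length := List.length_pos_of_ne_nil hq
    have hq0 : ¬ q.length = 0 := by omega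
    simp only [hq, hq0, if_false]
    by_cases hgt : q.length > seq.length
    · have hnil : PySem.List.pyRange 0 ((seq.length : Int) - (q.length : Int) + 1) 1 = [] :=
        PySem.List.pyRange_one_eq_nil (by omega)
      simp [hgt, hnil, pvARec]
    · have h0 := pv_main seq q hq (seq.length - q.length) 0 (by omega)
      simp only [List.drop_zero, Nat.cast_zero] at h0
      rw [PySem.List.slice_to_natCast]
      simp only [hgt, if_false]
      rw [← h0]
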